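-- pv_equiv track=rewrite | github.com/TechWithKen/Machine_Learning | Leetcode_machine_learning/Validsudoku.py | no_repetition
-- ===== SOURCE A (Python) =====
-- def no_repetition(array):
-- 	"""Function to ensure that there is no repetition in every 1-9 numbers given"""
-- 	no_repeat = []
-- 	for i in array:
-- 		if i == ".":
-- 			pass
-- 		else:
-- 			no_repeat.append(i)
-- 	if len(set(no_repeat)) != len(no_repeat):
-- 		return False
-- 	else:
-- 		return True
-- ===== SOURCE B (Python) =====
-- def no_repetition(array):
-- 	"""Function to ensure that there is no repetition in every 1-9 numbers given"""
-- 	seen = set()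
-- 	for i in array:
-- 		if i == ".":
-- 			continue
-- 		if i in seen:
-- 			return False
-- 		seen.add(i)
-- 	return True
-- ===== Notes on version B (the rewrite author's own statement) =====
-- stated objective: alternative
-- what changed: B replaces A's build-a-filtered-list-then-compare-set-size-to-list-length pass with a single streaming pass over the input that maintains a running seen set and returns False immediately at the first duplicate.
import Mathlib
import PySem

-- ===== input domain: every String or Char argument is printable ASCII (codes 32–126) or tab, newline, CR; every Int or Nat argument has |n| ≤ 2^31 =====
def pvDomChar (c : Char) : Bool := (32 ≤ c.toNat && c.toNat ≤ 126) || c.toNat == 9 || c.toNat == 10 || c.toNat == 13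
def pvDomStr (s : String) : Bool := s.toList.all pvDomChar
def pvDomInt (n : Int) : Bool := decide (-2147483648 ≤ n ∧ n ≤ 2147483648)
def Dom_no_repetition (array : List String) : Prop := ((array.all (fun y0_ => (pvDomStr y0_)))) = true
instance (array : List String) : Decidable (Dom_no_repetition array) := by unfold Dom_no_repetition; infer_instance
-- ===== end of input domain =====

-- B: one streaming pass with a running seen set and early exit on the first duplicate,
-- instead of A's filtered-list build followed by a set-size vs list-length comparison (alternative decomposition).

-- ===== PORT A =====
def no_repetition (array : List String) : Bool :=
  let no_repeat := array.foldl (fun acc i => if i == "." then acc else acc ++ [i]) []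
  if PySem.Set.len (PySem.Set.ofList no_repeat) != (no_repeat.length : Int) then false else true

-- ===== PORT B =====
def noRepSeen (seen : PySem.Set String) : List String → Bool
  | [] => true
  | i :: rest =>
    if i == "." then noRepSeen seen rest
    else if PySem.Set.contains seen i then false
    else noRepSeen (PySem.Set.add seen i) rest

def no_repetition_alt (array : List String) : Bool := noRepSeen PySem.Set.empty array

-- ===== PRECONDITION & SPEC =====
def Spec_no_repetition (array : List String) (out : Bool) : Prop := out = no_repetition_alt array
instance (array : List String) (out : Bool) : Decidable (Spec_no_repetition array out) := by unfold Spec_no_repetition; infer_instance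

-- ===== CLAIM (what is proved, stated in full; the proofs are below) =====
def Claim_equal_no_repetition : Prop := ∀ (array : List String), Dom_no_repetition array → Spec_no_repetition array (no_repetition array)

-- ===== LEMMAS AND PROOFS =====

-- A's foldl builds exactly the dot-free filter of the input.
theorem foldl_filter_dot (array : List String) (acc : List String) :
    array.foldl (fun acc i => if i == "." then acc else acc ++ [i]) acc
      = acc ++ array.filter (fun i => !(i == ".")) := by
  induction array generalizing acc with
  | nil => simp
  | cons x xs ih =>
    rw [List.foldl_cons]
    by_cases hx : x = "."
    · simp only [hx, beq_self_eq_true, if_true, List.filter_cons, Bool.not_true]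
      simpa using ih acc
    · have hb : (x == ".") = false := by simp [hx]
      simp only [hb, Bool.false_eq_true, if_false, List.filter_cons, Bool.not_false]
      rw [ih]
      simp

-- set(l) has the same size as l exactly when l has no duplicates.
theorem ofList_length_iff (l : List String) :
    (PySem.Set.ofList l).length = l.length ↔ l.Nodup := by
  induction l with
  | nil => simp [PySem.Set.ofList_nil]
  | cons x xs ih =>
    rw [PySem.Set.ofList_cons]
    by_cases hx : x ∈ xs
    · have hx' : x ∈ PySem.Set.ofList xs := (PySem.Set.mem_ofList xs x).2 hx
      have hlt : (PySem.Set.discard (PySem.Set.ofList xs) x).length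
          < (PySem.Set.ofList xs).length := by
        simp only [PySem.Set.discard]
        exact List.length_filter_lt_length_iff_exists.2 ⟨x, hx', by simp⟩
      have hle := PySem.Set.length_ofList_le (xs := xs)
      constructor
      · intro h; simp [List.length_cons] at h; omega
      · intro h; exact absurd hx (by simp [List.nodup_cons] at h; exact h.1)
    · have hx' : x ∉ PySem.Set.ofList xs := fun h => hx ((PySem.Set.mem_ofList xs x).1 h)
      have hdisc : PySem.Set.discard (PySem.Set.ofList xs) x = PySem.Set.ofList xs := by
        simp only [PySem.Set.discard]
        apply List.filter_eq_self.2
        intro a ha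
        have hax : a ≠ x := fun h => hx' (h ▸ ha)
        simp [hax]
      rw [hdisc]
      simp [List.nodup_cons, hx, ih]

-- B's loop succeeds exactly when seen plus the dot-free filter of the rest has no duplicates.
theorem noRepSeen_iff (rest : List String) (seen : PySem.Set String) (hseen : seen.Nodup) :
    noRepSeen seen rest = true ↔ (seen ++ rest.filter (fun i => !(i == "."))).Nodup := by
  induction rest generalizing seen with
  | nil => simp [noRepSeen, hseen]
  | cons i rs ih =>
    by_cases hi : i = "."
    · simp [noRepSeen, hi, ih seen hseen]
    · by_cases hmem : i ∈ seen
      · have hc : PySem.Set.contains seen i = true := (PySem.Set.contains_iff seen i).2 hmem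
        simp only [noRepSeen, beq_iff_eq, if_neg hi, hc, if_true]
        constructor
        · intro h; exact absurd h (by simp)
        · intro h
          rw [List.filter_cons, if_pos (by simp [hi]), List.nodup_append] at h
          exact absurd rfl (h.2.2 i hmem i (List.mem_cons_self ..))
      · have hc : PySem.Set.contains seen i = false := by
          rw [← Bool.not_eq_true]; exact fun h => hmem ((PySem.Set.contains_iff seen i).1 h)
        have hadd : PySem.Set.add seen i = seen ++ [i] := PySem.Set.add_of_not_mem hmem
        have hnd : (seen ++ [i]).Nodup := by
          simp [List.nodup_append, hseen]
          intro a ha rfl; exact hmem ha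
        simp only [noRepSeen, beq_iff_eq, if_neg hi, hc, Bool.false_eq_true, if_false]
        rw [hadd] at *
        rw [ih _ hnd, List.filter_cons, if_pos (by simp [hi]), List.append_assoc]
        simp

-- ===== VERDICT (by name: the statement is the Claim_ definition above) =====
theorem no_repetition_spec : Claim_equal_no_repetition := by
  intro array _
  unfold Spec_no_repetition no_repetition no_repetition_alt
  rw [foldl_filter_dot, List.nil_append]
  set l := array.filter (fun i => !(i == ".")) with hl
  have hB := noRepSeen_iff array PySem.Set.empty (by simp [PySem.Set.empty])
  rw [Bool.eq_iff_iff]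
  constructor
  · intro hA
    apply hB.2
    by_cases h : (PySem.Set.ofList l).length = l.length
    · simpa [← hl] using (ofList_length_iff l).1 h
    · exfalso
      simp only [PySem.Set.len, bne] at hA
      split at hA
      · exact absurd hA (by simp)
      · rename_i hcond
        simp at hcond
        exact h (by exact_mod_cast hcond)
  · intro hBt
    have hnd : l.Nodup := by simpa [← hl] using hB.1 hBt
    have := (ofList_length_iff l).2 hnd
    simp [PySem.Set.len, this]
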